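-- pv_equiv track=rewrite | github.com/TanjimTajwar/Algorithm_Lab_Task | From Niloy/B_Binary_Typewriter.py | calc
-- ===== SOURCE A (Python) =====
-- def calc(s):
--     finger = '0'
--     cost = 0
--
--     for char in s:
--         if char != finger:
--             cost += 1
--             finger = char
--         cost += 1
--
--     return cost
-- ===== SOURCE B (Python) =====
-- def calc(s):
--     # Two-stage run decomposition: first split s into maximal runs of equal
--     # characters, then charge one toggle plus the run length per run, refunding
--     # the toggle of a leading '0' run (the finger starts on '0').
--     runs = []
--     i = 0
--     n = len(s)
--     while i < n:
--         j = i
--         while j < n and s[j] == s[i]: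
--             j += 1
--         runs.append((s[i], j - i))
--         i = j
--     cost = sum(1 + cnt for _, cnt in runs)
--     if runs and runs[0][0] == '0':
--         cost -= 1
--     return cost
-- ===== Notes on version B (the rewrite author's own statement) =====
-- stated objective: alternative
-- what changed: Replaced A's single stateful per-character finger-toggle loop by a two-stage run decomposition: an explicit nested scan first splits the string into maximal runs (char, count), then one toggle plus the run length is charged per run, refunding the toggle of a leading '0' run.
import Mathlib
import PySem

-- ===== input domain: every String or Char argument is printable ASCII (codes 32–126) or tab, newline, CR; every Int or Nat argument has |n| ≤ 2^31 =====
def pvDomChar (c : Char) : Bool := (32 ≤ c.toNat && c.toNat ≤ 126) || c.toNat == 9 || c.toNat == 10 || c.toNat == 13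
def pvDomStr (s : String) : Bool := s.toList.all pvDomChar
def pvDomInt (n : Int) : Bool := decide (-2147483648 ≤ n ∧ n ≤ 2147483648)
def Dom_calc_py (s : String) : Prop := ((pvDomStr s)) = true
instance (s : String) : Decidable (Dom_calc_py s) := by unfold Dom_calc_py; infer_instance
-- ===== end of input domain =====

-- B replaces A's stateful per-character finger-toggle loop by a two-stage run
-- decomposition (split into maximal runs, then charge toggle+length per run);
-- objective: alternative decomposition, same O(n) cost.

-- ===== PORT A =====
def calc_py (s : String) : Int :=
  (s.toList.foldl
    (fun (st : Char × Int) char =>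
      let finger := st.1
      let cost := st.2
      if char ≠ finger then (char, cost + 1 + 1) else (finger, cost + 1))
    ('0', 0)).2

-- ===== PORT B =====
-- inner while loop of Source B: consume the leading run of character c, returning
-- (its length, the rest of the list)
def takeRun (c : Char) : List Char → Nat × List Char
  | [] => (0, [])
  | x :: xs => if x = c then
      let p := takeRun c xs
      (p.1 + 1, p.2)
    else (0, x :: xs)

theorem takeRun_len (c : Char) : ∀ xs : List Char, (takeRun c xs).2.length ≤ xs.length := by
  intro xs
  induction xs with
  | nil => simp [takeRun]
  | cons x xs ih =>
    by_cases h : x = c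
    · simp only [takeRun, if_pos h]
      exact le_trans ih (Nat.le_succ _)
    · simp [takeRun, h]

-- outer while loop of Source B: the list of maximal runs (char, count)
def runsOf : List Char → List (Char × Nat)
  | [] => []
  | x :: xs =>
    let p := takeRun x xs
    (x, p.1 + 1) :: runsOf p.2
termination_by l => l.length
decreasing_by
  simpa using Nat.lt_succ_of_le (takeRun_len x xs)

def calc_py_alt (s : String) : Int :=
  let runs := runsOf s.toList
  let cost := (runs.map (fun p => 1 + (p.2 : Int))).sum
  match runs with
  | [] => cost
  | (c, _) :: _ => if c = '0' then cost - 1 else cost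

-- ===== PRECONDITION & SPEC =====
def Spec_calc_py (s : String) (out : Int) : Prop := out = calc_py_alt s
instance (s : String) (out : Int) : Decidable (Spec_calc_py s out) := by unfold Spec_calc_py; infer_instance

-- ===== CLAIM (what is proved, stated in full; the proofs are below) =====
def Claim_equal_calc_py : Prop := ∀ (s : String), Dom_calc_py s → Spec_calc_py s (calc_py s)

-- ===== LEMMAS AND PROOFS =====

-- chg f l = number of positions where the char differs from the previous one (initial finger f)
def chg (f : Char) : List Char → Int
  | [] => 0
  | x :: xs => (if x ≠ f then 1 else 0) + chg x xs

def stepA (st : Char × Int) (char : Char) : Char × Int :=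
  let finger := st.1
  let cost := st.2
  if char ≠ finger then (char, cost + 1 + 1) else (finger, cost + 1)

theorem calc_py_eq_stepA (s : String) :
    calc_py s = (s.toList.foldl stepA ('0', 0)).2 := rfl

theorem foldl_cost (l : List Char) : ∀ (f : Char) (c : Int),
    (l.foldl stepA (f, c)).2 = c + l.length + chg f l := by
  induction l with
  | nil => intro f c; simp [chg]
  | cons x xs ih =>
    intro f c
    rw [List.foldl_cons]
    by_cases h : x = f
    · rw [show stepA (f, c) x = (f, c + 1) from by simp [stepA, h], ih]
      simp [chg, h]; ring
    · rw [show stepA (f, c) x = (x, c + 1 + 1) from by simp [stepA, h], ih]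
      simp [chg, h]; ring

theorem takeRun_spec (c : Char) : ∀ xs : List Char,
    xs = List.replicate (takeRun c xs).1 c ++ (takeRun c xs).2 ∧
    (∀ y l, (takeRun c xs).2 = y :: l → y ≠ c) := by
  intro xs
  induction xs with
  | nil => simp [takeRun]
  | cons x xs ih =>
    by_cases h : x = c
    · simp only [takeRun, if_pos h]
      refine ⟨?_, ih.2⟩
      conv_lhs => rw [h, ih.1]
      simp [List.replicate_succ]
    · simp only [takeRun, if_neg h]
      exact ⟨by simp, by intro y l hyl; cases hyl; exact h⟩

theorem chg_replicate (c : Char) : ∀ (n : Nat) (r : List Char),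
    chg c (List.replicate n c ++ r) = chg c r := by
  intro n
  induction n with
  | zero => simp
  | succ k ih => intro r; simp [List.replicate_succ, chg, ih]

-- head-refund term: 1 if the string starts with f, else 0
def headIs (l : List Char) (f : Char) : Int :=
  match l with
  | [] => 0
  | x :: _ => if x = f then 1 else 0

theorem runsOf_sum (l : List Char) :
    ((runsOf l).map (fun p => 1 + (p.2 : Int))).sum
      = (runsOf l).length + l.length := by
  induction l using runsOf.induct with
  | case1 => simp [runsOf]
  | case2 x xs p ih =>
    have hp : p = takeRun x xs := rfl
    have hsp := takeRun_spec x xs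
    rw [← hp] at hsp
    have hlen : xs.length = p.1 + p.2.length := by
      conv_lhs => rw [hsp.1]
      simp
    simp only [runsOf, ← hp, List.map_cons, List.sum_cons, List.length_cons, ih, hlen]
    push_cast
    ring

theorem chg_runs (l : List Char) : ∀ f : Char,
    chg f l = ((runsOf l).length : Int) - headIs l f := by
  induction l using runsOf.induct with
  | case1 => simp [runsOf, chg, headIs]
  | case2 x xs p ih =>
    intro f
    have hp : p = takeRun x xs := rfl
    have hsp := takeRun_spec x xs
    rw [← hp] at hsp
    have hchg : chg x xs = chg x p.2 := by
      conv_lhs => rw [hsp.1]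
      exact chg_replicate x p.1 p.2
    have hhead : headIs p.2 x = 0 := by
      cases hp2 : p.2 with
      | nil => simp [headIs]
      | cons y l' => simp [headIs, hsp.2 y l' hp2]
    simp only [chg, hchg, ih x, hhead]
    simp only [runsOf, ← hp, List.length_cons, headIs]
    by_cases h : x = f
    · simp [h]
    · simp [h]
      omega

-- ===== VERDICT (by name: the statement is the Claim_ definition above) =====
theorem calc_py_spec : Claim_equal_calc_py := by
  intro s _
  unfold Spec_calc_py
  rw [calc_py_eq_stepA, foldl_cost]
  unfold calc_py_alt
  cases hl : s.toList with
  | nil => simp [runsOf, chg]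
  | cons c rest =>
    rw [chg_runs]
    have hlen : (rest.length : Int)
        = (takeRun c rest).1 + (takeRun c rest).2.length := by
      conv_lhs => rw [(takeRun_spec c rest).1]
      push_cast
      simp
    simp only [runsOf, headIs, List.length_cons]
    rw [List.map_cons, List.sum_cons, runsOf_sum]
    by_cases h : c = '0'
    · subst h
      rw [if_pos rfl]
      push_cast
      omega
    · simp only [if_neg h]
      push_cast
      omega
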